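-- pv_equiv track=rewrite | github.com/Inist-CNRS/web-services | services/chem-ner/v1/chem/tagger.py | curate_list
-- ===== SOURCE A (Python) =====
-- def curate_list(input_list):
--     output_list = []
--     for elt in input_list:
--         if '#' not in elt:
--             output_list.append(
--                         elt.replace('- ','-').replace(' -','-').replace('( ','(').replace(' (','(').replace(') ',')').replace(' )',')').replace('[ ','[')
--                         .replace(' [','[').replace('] ',']').replace(' ]',']')
--                         )
--     return output_list
-- ===== SOURCE B (Python) =====
-- SPECIALS = frozenset('-()[]')
--
-- def _squeeze(s):
--     # single left-to-right pass deleting one optional space on each side of -, (, ), [, ]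
--     res = []
--     i, n = 0, len(s)
--     while i < n:
--         ch = s[i]
--         if ch == ' ' and i + 1 < n and s[i + 1] in SPECIALS:
--             res.append(s[i + 1])
--             i += 2
--             if i < n and s[i] == ' ':
--                 i += 1
--         elif ch in SPECIALS:
--             res.append(ch)
--             i += 1
--             if i < n and s[i] == ' ':
--                 i += 1
--         else:
--             res.append(ch)
--             i += 1
--     return ''.join(res)
--
-- def curate_list(input_list):
--     return [_squeeze(elt) for elt in input_list if '#' not in elt]
-- ===== Notes on version B (the rewrite author's own statement) =====
-- stated objective: alternative
-- what changed: Replaced the chain of ten full-string str.replace passes with a single left-to-right scan that deletes one optional space on each side of any of '-','(',')','[',']', and builds the result as a filter-comprehension.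
import Mathlib
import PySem

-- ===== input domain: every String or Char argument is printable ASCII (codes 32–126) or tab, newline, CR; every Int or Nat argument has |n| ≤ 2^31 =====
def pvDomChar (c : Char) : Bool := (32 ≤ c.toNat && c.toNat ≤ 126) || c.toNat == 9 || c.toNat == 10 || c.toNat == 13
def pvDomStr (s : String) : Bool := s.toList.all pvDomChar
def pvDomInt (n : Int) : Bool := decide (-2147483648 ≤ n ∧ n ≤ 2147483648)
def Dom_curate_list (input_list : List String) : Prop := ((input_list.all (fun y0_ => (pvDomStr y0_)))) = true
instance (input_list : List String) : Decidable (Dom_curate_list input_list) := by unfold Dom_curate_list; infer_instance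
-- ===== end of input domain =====

-- B replaces A's ten-pass str.replace chain with a single left-to-right scan that deletes one
-- optional space on each side of each of '-','(',')','[',']' (objective: alternative, same cost).

-- ===== PORT A =====
-- the ten chained replaces applied to one element (A's expression, inside the append)
def pvChainStr (elt : String) : String :=
  PySem.Str.replace (PySem.Str.replace (PySem.Str.replace (PySem.Str.replace (PySem.Str.replace
    (PySem.Str.replace (PySem.Str.replace (PySem.Str.replace (PySem.Str.replace
      (PySem.Str.replace elt "- " "-") " -" "-") "( " "(") " (" "(") ") " ")")
        " )" ")") "[ " "[") " [" "[") "] " "]") " ]" "]"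

def curate_list (input_list : List String) : List String :=
  input_list.foldl
    (fun output_list elt =>
      if PySem.Str.isIn "#" elt = false then output_list ++ [pvChainStr elt] else output_list)
    []

-- ===== PORT B =====
def pvSpec (c : Char) : Bool := c == '-' || c == '(' || c == ')' || c == '[' || c == ']'

-- "if i < n and s[i] == ' ': i += 1" — skip one optional space
def pvStrip1 : List Char → List Char
  | [] => []
  | x :: r => if x == ' ' then r else x :: r

theorem pvStrip1_length_le (l : List Char) : (pvStrip1 l).length ≤ l.length := by
  cases l with
  | nil => simp [pvStrip1]
  | cons x r => simp [pvStrip1]; split <;> simp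

-- B's while loop over the string, one pass
def pvSqueeze : List Char → List Char
  | [] => []
  | x :: xs =>
    if x == ' ' then
      match xs with
      | [] => [' ']
      | y :: t => if pvSpec y then y :: pvSqueeze (pvStrip1 t) else ' ' :: pvSqueeze (y :: t)
    else if pvSpec x then x :: pvSqueeze (pvStrip1 xs)
    else x :: pvSqueeze xs
termination_by l => l.length
decreasing_by
  · have := pvStrip1_length_le t; simp; omega
  · simp
  · have := pvStrip1_length_le xs; simp; omega
  · simp

def curate_list_alt (input_list : List String) : List String :=
  (input_list.filter (fun elt => !PySem.Str.isIn "#" elt)).map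
    (fun elt => String.ofList (pvSqueeze elt.toList))

-- ===== PRECONDITION & SPEC =====
def Spec_curate_list (input_list : List String) (out : List String) : Prop := out = curate_list_alt input_list
instance (input_list : List String) (out : List String) : Decidable (Spec_curate_list input_list out) := by unfold Spec_curate_list; infer_instance

-- ===== CLAIM (what is proved, stated in full; the proofs are below) =====
def Claim_equal_curate_list : Prop := ∀ (input_list : List String), Dom_curate_list input_list → Spec_curate_list input_list (curate_list input_list)

-- ===== LEMMAS AND PROOFS =====

-- replacing the 2-char pattern [a,b] by `out`, as a direct structural recursion
def pvRep2 (a b : Char) (out : List Char) : List Char → List Char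
  | x :: y :: t => if x == a && y == b then out ++ pvRep2 a b out t else x :: pvRep2 a b out (y :: t)
  | l => l

theorem rep2_go (a b : Char) (out : List Char) :
    ∀ (fuel : Nat) (l acc : List Char), l.length ≤ fuel →
      PySem.Chars.replace.go [a, b] out fuel l acc = acc.reverse ++ pvRep2 a b out l := by
  intro fuel
  induction fuel with
  | zero =>
    intro l acc h
    cases l with
    | nil => simp [PySem.Chars.replace.go, pvRep2]
    | cons c t => simp at h
  | succ n ih =>
    intro l acc h
    cases l with
    | nil => simp [PySem.Chars.replace.go, pvRep2]
    | cons c t =>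
      cases t with
      | nil =>
        rw [PySem.Chars.replace.go]
        rw [if_neg (by simp [List.isPrefixOf])]
        rw [ih [] (c :: acc) (by simp)]
        simp [pvRep2]
      | cons y t' =>
        rw [PySem.Chars.replace.go]
        by_cases hp : c = a ∧ y = b
        · obtain ⟨rfl, rfl⟩ := hp
          rw [if_pos (by simp [List.isPrefixOf])]
          simp only [List.length_cons, List.drop_succ_cons, List.length_nil, Nat.zero_add, List.drop]
          rw [ih t' (out.reverse ++ acc) (by simp at h ⊢; omega)]
          simp [pvRep2]
        · have hpre : List.isPrefixOf [a, b] (c :: y :: t') = false := by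
            simp [List.isPrefixOf]; tauto
          rw [if_neg (by simp [hpre])]
          rw [ih (y :: t') (c :: acc) (by simp at h ⊢; omega)]
          simp [pvRep2]
          intro h1 h2; exact absurd ⟨h1, h2⟩ hp

theorem replace_eq_rep2 (a b : Char) (out m : List Char) :
    PySem.Chars.replace m [a, b] out = pvRep2 a b out m := by
  rw [PySem.Chars.replace]
  simp [rep2_go a b out m.length m [] le_rfl]

-- the two replaces A does for one special char c, composed
def pvPair (c : Char) (l : List Char) : List Char :=
  pvRep2 ' ' c [c] (pvRep2 c ' ' [c] l)

-- A's whole chain on the character list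
def pvChainC (l : List Char) : List Char :=
  pvPair ']' (pvPair '[' (pvPair ')' (pvPair '(' (pvPair '-' l))))

theorem CS_cons (c x : Char) (m : List Char) (hx : x ≠ c) :
    pvRep2 c ' ' [c] (x :: m) = x :: pvRep2 c ' ' [c] m := by
  cases m with
  | nil => simp [pvRep2]
  | cons y t => simp [pvRep2, hx]

theorem SC_cons (c x : Char) (m : List Char) (hx : x ≠ ' ') :
    pvRep2 ' ' c [c] (x :: m) = x :: pvRep2 ' ' c [c] m := by
  cases m with
  | nil => simp [pvRep2]
  | cons y t => simp [pvRep2, hx]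

theorem CS_head (c : Char) (m : List Char) (_hc : c ≠ ' ') :
    pvRep2 c ' ' [c] (c :: m) = c :: pvRep2 c ' ' [c] (pvStrip1 m) := by
  cases m with
  | nil => simp [pvRep2, pvStrip1]
  | cons y t =>
    by_cases hy : y = ' '
    · subst hy; simp [pvRep2, pvStrip1]
    · simp [pvRep2, pvStrip1, hy]

theorem L1 (c x : Char) (m : List Char) (hx : x ≠ ' ') (hxc : x ≠ c) :
    pvPair c (x :: m) = x :: pvPair c m := by
  unfold pvPair
  rw [CS_cons c x m hxc, SC_cons c x _ hx]

theorem L2 (c : Char) (m : List Char) (hc : c ≠ ' ') :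
    pvPair c (c :: m) = c :: pvPair c (pvStrip1 m) := by
  unfold pvPair
  rw [CS_head c m hc, SC_cons c c _ hc]

theorem L3 (c : Char) (m : List Char) (hc : c ≠ ' ') :
    pvPair c (' ' :: c :: m) = c :: pvPair c (pvStrip1 m) := by
  unfold pvPair
  have h1 : pvRep2 c ' ' [c] (' ' :: c :: m) = ' ' :: c :: pvRep2 c ' ' [c] (pvStrip1 m) := by
    rw [CS_cons c ' ' _ (fun h => hc h.symm), CS_head c m hc]
  rw [h1]
  simp [pvRep2]

theorem L4 (c : Char) (m : List Char) (hc : c ≠ ' ') (hm : m.head? ≠ some c) :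
    pvPair c (' ' :: m) = ' ' :: pvPair c m := by
  unfold pvPair
  cases m with
  | nil => simp [pvRep2]
  | cons y t =>
    have hy : y ≠ c := by simpa using hm
    rw [CS_cons c ' ' _ (fun h => hc h.symm), CS_cons c y t hy]
    rw [show pvRep2 ' ' c [c] (' ' :: y :: pvRep2 c ' ' [c] t)
        = ' ' :: pvRep2 ' ' c [c] (y :: pvRep2 c ' ' [c] t) by simp [pvRep2, hy]]

theorem SCm (c : Char) (m : List Char) (hc : c ≠ ' ') :
    pvStrip1 (pvPair c m) = pvPair c (pvStrip1 m) := by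
  cases m with
  | nil => simp [pvPair, pvRep2, pvStrip1]
  | cons h t =>
    by_cases hh : h = ' '
    · subst hh
      cases t with
      | nil => simp [pvPair, pvRep2, pvStrip1]
      | cons y t' =>
        by_cases hy : y = c
        · subst hy
          rw [L3 y t' hc]
          rw [show pvStrip1 (' ' :: y :: t') = y :: t' from by simp [pvStrip1]]
          rw [L2 y t' hc]
          simp [pvStrip1, hc]
        · rw [L4 c (y :: t') hc (by simpa using hy)]
          simp [pvStrip1]
    · rw [show pvStrip1 (h :: t) = h :: t from by simp [pvStrip1, hh]]
      by_cases hhc : h = c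
      · subst hhc
        rw [L2 h t hc]
        simp [pvStrip1, hc]
      · rw [L1 c h t hh hhc]
        simp [pvStrip1, hh]

theorem HD (c d : Char) (m : List Char) (hc : c ≠ ' ') (hd1 : d ≠ ' ') (hd2 : d ≠ c)
    (hm : m.head? ≠ some d) : (pvPair c m).head? ≠ some d := by
  cases m with
  | nil => simp [pvPair, pvRep2]
  | cons h t =>
    by_cases hh : h = ' '
    · subst hh
      cases t with
      | nil =>
          simp [pvPair, pvRep2]
          exact fun h => hd1 h.symm
      | cons y t' =>
        by_cases hy : y = c
        · subst hy; rw [L3 y t' hc]; simpa using Ne.symm hd2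
        · rw [L4 c (y :: t') hc (by simpa using hy)]; simpa using Ne.symm hd1
    · by_cases hhc : h = c
      · subst hhc; rw [L2 h t hc]; simpa using Ne.symm hd2
      · rw [L1 c h t hh hhc]; simpa using hm

-- chain-level step lemmas
theorem chain_nil : pvChainC [] = [] := by decide

theorem chain_sp_nil : pvChainC [' '] = [' '] := by decide

theorem chain_other (x : Char) (m : List Char) (hx : x ≠ ' ')
    (h1 : x ≠ '-') (h2 : x ≠ '(') (h3 : x ≠ ')') (h4 : x ≠ '[') (h5 : x ≠ ']') :
    pvChainC (x :: m) = x :: pvChainC m := by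
  unfold pvChainC
  rw [L1 '-' x m hx h1, L1 '(' x _ hx h2, L1 ')' x _ hx h3, L1 '[' x _ hx h4, L1 ']' x _ hx h5]

theorem chain_dash (m : List Char) : pvChainC ('-' :: m) = '-' :: pvChainC (pvStrip1 m) := by
  unfold pvChainC
  rw [L2 '-' m (by decide), L1 '(' '-' _ (by decide) (by decide), L1 ')' '-' _ (by decide) (by decide),
      L1 '[' '-' _ (by decide) (by decide), L1 ']' '-' _ (by decide) (by decide)]

theorem chain_lpar (m : List Char) : pvChainC ('(' :: m) = '(' :: pvChainC (pvStrip1 m) := by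
  unfold pvChainC
  rw [L1 '-' '(' m (by decide) (by decide), L2 '(' _ (by decide), SCm '-' m (by decide),
      L1 ')' '(' _ (by decide) (by decide), L1 '[' '(' _ (by decide) (by decide),
      L1 ']' '(' _ (by decide) (by decide)]

theorem chain_rpar (m : List Char) : pvChainC (')' :: m) = ')' :: pvChainC (pvStrip1 m) := by
  unfold pvChainC
  rw [L1 '-' ')' m (by decide) (by decide), L1 '(' ')' _ (by decide) (by decide),
      L2 ')' _ (by decide), SCm '(' _ (by decide), SCm '-' m (by decide),
      L1 '[' ')' _ (by decide) (by decide), L1 ']' ')' _ (by decide) (by decide)]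

theorem chain_lbrk (m : List Char) : pvChainC ('[' :: m) = '[' :: pvChainC (pvStrip1 m) := by
  unfold pvChainC
  rw [L1 '-' '[' m (by decide) (by decide), L1 '(' '[' _ (by decide) (by decide),
      L1 ')' '[' _ (by decide) (by decide), L2 '[' _ (by decide),
      SCm ')' _ (by decide), SCm '(' _ (by decide), SCm '-' m (by decide),
      L1 ']' '[' _ (by decide) (by decide)]

theorem chain_rbrk (m : List Char) : pvChainC (']' :: m) = ']' :: pvChainC (pvStrip1 m) := by
  unfold pvChainC
  rw [L1 '-' ']' m (by decide) (by decide), L1 '(' ']' _ (by decide) (by decide),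
      L1 ')' ']' _ (by decide) (by decide), L1 '[' ']' _ (by decide) (by decide),
      L2 ']' _ (by decide),
      SCm '[' _ (by decide), SCm ')' _ (by decide), SCm '(' _ (by decide), SCm '-' m (by decide)]

theorem chain_sp_dash (t : List Char) : pvChainC (' ' :: '-' :: t) = '-' :: pvChainC (pvStrip1 t) := by
  unfold pvChainC
  rw [L3 '-' t (by decide), L1 '(' '-' _ (by decide) (by decide), L1 ')' '-' _ (by decide) (by decide),
      L1 '[' '-' _ (by decide) (by decide), L1 ']' '-' _ (by decide) (by decide)]

theorem chain_sp_lpar (t : List Char) : pvChainC (' ' :: '(' :: t) = '(' :: pvChainC (pvStrip1 t) := by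
  unfold pvChainC
  rw [L4 '-' ('(' :: t) (by decide) (by simp), L1 '-' '(' t (by decide) (by decide),
      L3 '(' _ (by decide), SCm '-' t (by decide),
      L1 ')' '(' _ (by decide) (by decide), L1 '[' '(' _ (by decide) (by decide),
      L1 ']' '(' _ (by decide) (by decide)]

theorem chain_sp_rpar (t : List Char) : pvChainC (' ' :: ')' :: t) = ')' :: pvChainC (pvStrip1 t) := by
  unfold pvChainC
  rw [L4 '-' (')' :: t) (by decide) (by simp), L1 '-' ')' t (by decide) (by decide),
      L4 '(' _ (by decide) (by simp), L1 '(' ')' _ (by decide) (by decide),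
      L3 ')' _ (by decide), SCm '(' _ (by decide), SCm '-' t (by decide),
      L1 '[' ')' _ (by decide) (by decide), L1 ']' ')' _ (by decide) (by decide)]

theorem chain_sp_lbrk (t : List Char) : pvChainC (' ' :: '[' :: t) = '[' :: pvChainC (pvStrip1 t) := by
  unfold pvChainC
  rw [L4 '-' ('[' :: t) (by decide) (by simp), L1 '-' '[' t (by decide) (by decide),
      L4 '(' _ (by decide) (by simp), L1 '(' '[' _ (by decide) (by decide),
      L4 ')' _ (by decide) (by simp), L1 ')' '[' _ (by decide) (by decide),
      L3 '[' _ (by decide), SCm ')' _ (by decide), SCm '(' _ (by decide), SCm '-' t (by decide),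
      L1 ']' '[' _ (by decide) (by decide)]

theorem chain_sp_rbrk (t : List Char) : pvChainC (' ' :: ']' :: t) = ']' :: pvChainC (pvStrip1 t) := by
  unfold pvChainC
  rw [L4 '-' (']' :: t) (by decide) (by simp), L1 '-' ']' t (by decide) (by decide),
      L4 '(' _ (by decide) (by simp), L1 '(' ']' _ (by decide) (by decide),
      L4 ')' _ (by decide) (by simp), L1 ')' ']' _ (by decide) (by decide),
      L4 '[' _ (by decide) (by simp), L1 '[' ']' _ (by decide) (by decide),
      L3 ']' _ (by decide), SCm '[' _ (by decide), SCm ')' _ (by decide), SCm '(' _ (by decide),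
      SCm '-' t (by decide)]

theorem chain_sp_other (y : Char) (t : List Char)
    (h1 : y ≠ '-') (h2 : y ≠ '(') (h3 : y ≠ ')') (h4 : y ≠ '[') (h5 : y ≠ ']') :
    pvChainC (' ' :: y :: t) = ' ' :: pvChainC (y :: t) := by
  unfold pvChainC
  rw [L4 '-' (y :: t) (by decide) (by simpa using h1)]
  rw [L4 '(' _ (by decide) (HD '-' '(' (y :: t) (by decide) (by decide) (by decide) (by simpa using h2))]
  rw [L4 ')' _ (by decide) (HD '(' ')' _ (by decide) (by decide) (by decide)
      (HD '-' ')' (y :: t) (by decide) (by decide) (by decide) (by simpa using h3)))]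
  rw [L4 '[' _ (by decide) (HD ')' '[' _ (by decide) (by decide) (by decide)
      (HD '(' '[' _ (by decide) (by decide) (by decide)
      (HD '-' '[' (y :: t) (by decide) (by decide) (by decide) (by simpa using h4))))]
  rw [L4 ']' _ (by decide) (HD '[' ']' _ (by decide) (by decide) (by decide)
      (HD ')' ']' _ (by decide) (by decide) (by decide)
      (HD '(' ']' _ (by decide) (by decide) (by decide)
      (HD '-' ']' (y :: t) (by decide) (by decide) (by decide) (by simpa using h5)))))]

-- squeeze equation lemmas
theorem sq_sp_spec (y : Char) (t : List Char) (hy : pvSpec y = true) :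
    pvSqueeze (' ' :: y :: t) = y :: pvSqueeze (pvStrip1 t) := by
  rw [pvSqueeze.eq_def]; simp [hy]

theorem sq_sp_other (y : Char) (t : List Char) (hy : pvSpec y = false) :
    pvSqueeze (' ' :: y :: t) = ' ' :: pvSqueeze (y :: t) := by
  rw [pvSqueeze.eq_def]; simp [hy]

theorem sq_spec (x : Char) (m : List Char) (hx : x ≠ ' ') (h : pvSpec x = true) :
    pvSqueeze (x :: m) = x :: pvSqueeze (pvStrip1 m) := by
  rw [pvSqueeze.eq_def]; simp [hx, h]

theorem sq_other (x : Char) (m : List Char) (hx : x ≠ ' ') (h : pvSpec x = false) :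
    pvSqueeze (x :: m) = x :: pvSqueeze m := by
  rw [pvSqueeze.eq_def]; simp [hx, h]

-- the heart: A's chain of ten replaces equals B's single pass, on every character list
theorem chain_eq_squeeze_aux : ∀ (n : Nat) (l : List Char), l.length ≤ n → pvChainC l = pvSqueeze l := by
  intro n
  induction n with
  | zero =>
    intro l h
    cases l with
    | nil => rw [chain_nil]; simp [pvSqueeze.eq_def]
    | cons x xs => simp at h
  | succ n ih =>
    intro l h
    cases l with
    | nil => rw [chain_nil]; simp [pvSqueeze.eq_def]
    | cons x xs =>
      have hlen : xs.length ≤ n := by simp at h; omega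
      by_cases hx : x = ' '
      · subst hx
        cases xs with
        | nil => rw [chain_sp_nil]; simp [pvSqueeze.eq_def]
        | cons y t =>
          have hlt : t.length ≤ n := by simp at hlen; omega
          have hst : (pvStrip1 t).length ≤ n := le_trans (pvStrip1_length_le t) hlt
          by_cases h1 : y = '-'
          · subst h1; rw [chain_sp_dash, sq_sp_spec _ _ (by decide), ih _ hst]
          by_cases h2 : y = '('
          · subst h2; rw [chain_sp_lpar, sq_sp_spec _ _ (by decide), ih _ hst]
          by_cases h3 : y = ')'
          · subst h3; rw [chain_sp_rpar, sq_sp_spec _ _ (by decide), ih _ hst]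
          by_cases h4 : y = '['
          · subst h4; rw [chain_sp_lbrk, sq_sp_spec _ _ (by decide), ih _ hst]
          by_cases h5 : y = ']'
          · subst h5; rw [chain_sp_rbrk, sq_sp_spec _ _ (by decide), ih _ hst]
          · have hspec : pvSpec y = false := by simp [pvSpec, h1, h2, h3, h4, h5]
            rw [chain_sp_other y t h1 h2 h3 h4 h5, sq_sp_other y t hspec, ih _ hlen]
      · have hsx : (pvStrip1 xs).length ≤ n := le_trans (pvStrip1_length_le xs) hlen
        by_cases h1 : x = '-'
        · subst h1; rw [chain_dash, sq_spec _ _ hx (by decide), ih _ hsx]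
        by_cases h2 : x = '('
        · subst h2; rw [chain_lpar, sq_spec _ _ hx (by decide), ih _ hsx]
        by_cases h3 : x = ')'
        · subst h3; rw [chain_rpar, sq_spec _ _ hx (by decide), ih _ hsx]
        by_cases h4 : x = '['
        · subst h4; rw [chain_lbrk, sq_spec _ _ hx (by decide), ih _ hsx]
        by_cases h5 : x = ']'
        · subst h5; rw [chain_rbrk, sq_spec _ _ hx (by decide), ih _ hsx]
        · have hspec : pvSpec x = false := by simp [pvSpec, h1, h2, h3, h4, h5]
          rw [chain_other x xs hx h1 h2 h3 h4 h5, sq_other x xs hx hspec, ih _ hlen]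

theorem chain_eq_squeeze (l : List Char) : pvChainC l = pvSqueeze l :=
  chain_eq_squeeze_aux l.length l le_rfl

theorem chainStr_eq (e : String) : pvChainStr e = String.ofList (pvSqueeze e.toList) := by
  rw [← chain_eq_squeeze]
  simp only [pvChainStr, PySem.Str.replace, String.toList_ofList,
    show ("- ".toList = ['-', ' ']) from rfl, show (" -".toList = [' ', '-']) from rfl,
    show ("( ".toList = ['(', ' ']) from rfl, show (" (".toList = [' ', '(']) from rfl,
    show (") ".toList = [')', ' ']) from rfl, show (" )".toList = [' ', ')']) from rfl,
    show ("[ ".toList = ['[', ' ']) from rfl, show (" [".toList = [' ', '[']) from rfl,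
    show ("] ".toList = [']', ' ']) from rfl, show (" ]".toList = [' ', ']']) from rfl,
    show ("-".toList = ['-']) from rfl, show ("(".toList = ['(']) from rfl,
    show (")".toList = [')']) from rfl, show ("[".toList = ['[']) from rfl,
    show ("]".toList = [']']) from rfl,
    replace_eq_rep2, pvChainC, pvPair]

-- ===== VERDICT (by name: the statement is the Claim_ definition above) =====
theorem curate_list_spec : Claim_equal_curate_list := by
  intro l _
  unfold Spec_curate_list curate_list curate_list_alt
  have hcond : ∀ (e : String), (PySem.Str.isIn "#" e = false) = ((!PySem.Str.isIn "#" e) = true) := by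
    intro e; simp
  simp only [hcond]
  rw [PySem.List.foldl_append_if (fun e => !PySem.Str.isIn "#" e) pvChainStr l []]
  simp only [List.nil_append]
  exact List.map_congr_left (fun e _ => chainStr_eq e)
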